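-- pv_equiv track=rewrite | github.com/OmarTariq612/count-possibilities | python/solution_b.py | coin_possibilities_bua
-- ===== SOURCE A (Python) =====
-- def coin_possibilities_bua(tosses: int, not_allowed: int) -> int:
--     """coin_possibilities_bua(tosses, not_allowed)
--
--     Count the number of possibilities (sequences of heads and tails) resulting from tossing a coin.
--     tosses:       the number of tosses that will be considered
--     not_allowed:  the number of tails that are not allowed to be consecutive
--
--     this function uses buttom-up approach to solve the problem"""
--
--     dp_list = [0] * (tosses + 2)
--     dp_list[0] = 1
--     dp_list[1] = 1
--
--     for i in range(2, tosses + 2):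
--         if i - 1 < not_allowed:
--             dp_list[i] = dp_list[i - 1] * 2
--         else:
--             dp_list[i] = dp_list[i - 1] * 2 - dp_list[i - not_allowed - 1]
--
--     return dp_list[tosses + 1]
-- ===== SOURCE B (Python) =====
-- def _mat_vec(M, v):
--     n = len(v)
--     return [sum(row[t] * v[t] for t in range(n)) for row in M]
--
--
-- def _mat_mul(A, B):
--     n = len(B)
--     return [[sum(row[t] * B[t][j] for t in range(n)) for j in range(n)] for row in A]
--
--
-- def _mat_pow(M, e):
--     if e == 0:
--         return [[1 if i == j else 0 for j in range(len(M))] for i in range(len(M))]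
--     H = _mat_pow(M, e // 2)
--     H2 = _mat_mul(H, H)
--     return _mat_mul(M, H2) if e % 2 == 1 else H2
--
--
-- def coin_possibilities_bua(tosses: int, not_allowed: int) -> int:
--     """Companion-matrix exponentiation: the dp sequence satisfies the order-(k+1)
--     linear recurrence dp[i] = 2*dp[i-1] - dp[i-k-1] (pure doubling while i <= k),
--     so the answer dp[tosses+1] is read off by raising the (k+1)x(k+1) companion
--     matrix to the power n-k by binary squaring and applying it to the window of
--     initial values [dp[k], ..., dp[0]]."""
--     k = not_allowed
--     n = tosses + 1                    # the answer is dp[n]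
--     if n <= k:
--         return 2 ** (n - 1)           # doubling regime: the bound never bites
--     top = [0] * (k + 1)
--     top[0] += 2
--     top[k] -= 1                       # dp[i] = 2*dp[i-1] - dp[i-k-1]
--     M = [top] + [[1 if j == i else 0 for j in range(k + 1)] for i in range(k)]
--     v0 = [2 ** (k - 1 - i) for i in range(k)] + [1]   # [dp[k], ..., dp[1], dp[0]]
--     return _mat_vec(_mat_pow(M, n - k), v0)[0]
-- ===== Notes on version B (the rewrite author's own statement) =====
-- stated objective: alternative
-- what changed: Replaces A's linear bottom-up dp table with companion-matrix binary exponentiation: the order-(k+1) recurrence dp[i]=2*dp[i-1]-dp[i-k-1] is advanced by raising the (k+1)x(k+1) companion matrix to the power tosses+1-k via repeated squaring and applying it to the initial window [dp[k],...,dp[0]] (closed form 2**tosses while the bound never bites).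
-- outside the precondition, e.g. on coin_possibilities_bua(3, -1): A returns 8, B raises IndexError; on coin_possibilities_bua(0, -5): A returns 1, B raises IndexError; on coin_possibilities_bua(-1, 3): A raises IndexError, B returns 0.5
import Mathlib
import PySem

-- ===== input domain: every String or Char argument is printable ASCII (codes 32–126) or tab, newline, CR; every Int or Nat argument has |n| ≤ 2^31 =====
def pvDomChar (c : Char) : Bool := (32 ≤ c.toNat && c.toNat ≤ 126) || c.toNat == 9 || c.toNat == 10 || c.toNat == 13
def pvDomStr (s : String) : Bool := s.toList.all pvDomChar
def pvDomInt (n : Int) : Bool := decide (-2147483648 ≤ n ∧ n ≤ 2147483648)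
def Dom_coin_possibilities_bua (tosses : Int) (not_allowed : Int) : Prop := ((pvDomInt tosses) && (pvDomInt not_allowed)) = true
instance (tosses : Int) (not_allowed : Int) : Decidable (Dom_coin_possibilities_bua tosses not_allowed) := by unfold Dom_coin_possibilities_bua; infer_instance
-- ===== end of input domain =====

-- B replaces A's linear bottom-up dp table by companion-matrix binary exponentiation on the
-- order-(k+1) recurrence dp[i] = 2*dp[i-1] - dp[i-k-1] (closed form 2^tosses while the bound never
-- bites); equal to A for tosses >= 0 and not_allowed >= 0 (alternative algorithm, not claimed faster).


-- ===== PORT A =====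
def coin_possibilities_bua (tosses : Int) (not_allowed : Int) : Int :=
  let dp : List Int := List.replicate (tosses + 2).toNat 0
  let dp := PySem.List.pySetD dp 0 1
  let dp := PySem.List.pySetD dp 1 1
  let dp := (PySem.List.pyRange 2 (tosses + 2) 1).foldl (fun dp i =>
      if i - 1 < not_allowed then
        PySem.List.pySetD dp i (PySem.List.pyGetD dp (i - 1) 0 * 2)
      else
        PySem.List.pySetD dp i
          (PySem.List.pyGetD dp (i - 1) 0 * 2 - PySem.List.pyGetD dp (i - not_allowed - 1) 0)) dp
  PySem.List.pyGetD dp (tosses + 1) 0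

-- ===== PORT B =====
-- sum(row[t] * v[t] for t in range(n))  (indices always in range where B uses them)
def dotRange (n : Nat) (f : Nat → Int) : Int := ((List.range n).map f).sum

-- _mat_vec(M, v)
def matVec (M : List (List Int)) (v : List Int) : List Int :=
  M.map (fun row => dotRange v.length (fun t => row.getD t 0 * v.getD t 0))

-- _mat_mul(A, B)
def matMul (A B : List (List Int)) : List (List Int) :=
  A.map (fun row => (List.range B.length).map (fun j =>
    dotRange B.length (fun t => row.getD t 0 * (B.getD t []).getD j 0)))

-- the identity matrix built in _mat_pow's base case
def idMat (n : Nat) : List (List Int) :=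
  (List.range n).map (fun i => (List.range n).map (fun j => if i = j then (1 : Int) else 0))

-- _mat_pow(M, e)
def matPow (M : List (List Int)) (e : Nat) : List (List Int) :=
  if e = 0 then idMat M.length
  else
    let H := matPow M (e / 2)
    let H2 := matMul H H
    if e % 2 = 1 then matMul M H2 else H2
termination_by e
decreasing_by omega

def coin_possibilities_bua_alt (tosses : Int) (not_allowed : Int) : Int :=
  let k := not_allowed
  let n := tosses + 1                       -- the answer is dp[n]
  if n ≤ k then 2 ^ (n - 1).toNat           -- doubling regime: return 2 ** (n - 1)
  else
    let top := List.replicate (k + 1).toNat (0 : Int)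
    let top := top.set 0 (top.getD 0 0 + 2)
    let top := top.set k.toNat (top.getD k.toNat 0 - 1)
    let M := top :: (List.range k.toNat).map (fun i =>
      (List.range (k + 1).toNat).map (fun j => if j = i then (1 : Int) else 0))
    let v0 := ((List.range k.toNat).map (fun i => (2 : Int) ^ (k.toNat - 1 - i))) ++ [(1 : Int)]
    (matVec (matPow M (n - k).toNat) v0).getD 0 0

-- ===== PRECONDITION & SPEC =====
-- Pre_ excludes negative arguments: A raises IndexError for tosses < 0 and (with tosses ≥ 1) for
-- not_allowed ≤ -2; where A still returns on such inputs (not_allowed = -1, or tosses = 0 with a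
-- negative bound) the negative run bound is meaningless and A's value is an accident of reading
-- yet-unwritten zero entries / of the loop never running, and B raises there.
def Pre_coin_possibilities_bua (tosses : Int) (not_allowed : Int) : Prop :=
  0 ≤ tosses ∧ 0 ≤ not_allowed
instance (tosses : Int) (not_allowed : Int) : Decidable (Pre_coin_possibilities_bua tosses not_allowed) := by
  unfold Pre_coin_possibilities_bua; infer_instance

def pvWitness_coin_possibilities_bua : Int × Int := (5, 2)

def Spec_coin_possibilities_bua (tosses : Int) (not_allowed : Int) (out : Int) : Prop :=
  out = coin_possibilities_bua_alt tosses not_allowed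
instance (tosses : Int) (not_allowed : Int) (out : Int) : Decidable (Spec_coin_possibilities_bua tosses not_allowed out) := by
  unfold Spec_coin_possibilities_bua; infer_instance

-- ===== CLAIM (what is proved, stated in full; the proofs are below) =====
def Claim_equal_coin_possibilities_bua : Prop := ∀ (tosses : Int) (not_allowed : Int), Dom_coin_possibilities_bua tosses not_allowed → Pre_coin_possibilities_bua tosses not_allowed → Spec_coin_possibilities_bua tosses not_allowed (coin_possibilities_bua tosses not_allowed)

-- ===== LEMMAS AND PROOFS =====

-- the dp sequence both programs compute: dp[0] = dp[1] = 1, dp[i] = 2 dp[i-1] - [i-1 ≥ k] dp[i-1-k]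
def tseq (k : Nat) : Nat → Int
  | 0 => 1
  | 1 => 1
  | (i+2) => 2 * tseq k (i+1) - (if i + 1 < k then 0 else tseq k (i + 1 - k))

lemma tseq_doubling (k : Nat) : ∀ i : Nat, 1 ≤ i → i ≤ k → tseq k i = 2 ^ (i - 1) := by
  intro i
  induction i with
  | zero => omega
  | succ n ih =>
    intro _ hle
    match n, ih with
    | 0, _ => simp [tseq]
    | (m+1), ih =>
      rw [tseq]
      rw [ih (by omega) (by omega)]
      rw [if_pos (by omega)]
      have : m + 1 - 1 + 1 = m + 2 - 1 := by omega
      rw [← this]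
      ring

lemma tseq_zero : ∀ i : Nat, tseq 0 i = 1 := by
  intro i
  induction i with
  | zero => rw [tseq]
  | succ n ih =>
    match n, ih with
    | 0, _ => simp [tseq]
    | (m+1), ih =>
      rw [tseq, if_neg (by omega)]
      simp only [Nat.sub_zero]
      rw [ih]
      norm_num

-- one step of the recurrence, uniform in k (for k = 0 both sides are 1)
lemma tseq_step (k m : Nat) : tseq k (m + k + 1) = 2 * tseq k (m + k) - tseq k m := by
  by_cases hk : k = 0
  · subst hk; simp [tseq_zero]
  · obtain ⟨i, hi⟩ : ∃ i, m + k + 1 = i + 2 := ⟨m + k - 1, by omega⟩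
    rw [hi, tseq, if_neg (by omega)]
    have h1 : i + 1 = m + k := by omega
    rw [h1, show m + k - k = m from by omega]

-- ---- A-side: the dp table ----
def dpArr (k N m : Nat) : List Int := (List.range N).map (fun j => if j ≤ m + 1 then tseq k j else 0)

lemma dpArr_getD (k N m p : Nat) (hp : p < N) :
    (dpArr k N m).getD p 0 = if p ≤ m + 1 then tseq k p else 0 := by
  simp [dpArr, List.getD_eq_getElem?_getD, List.getElem?_map, List.getElem?_range hp]

lemma dpArr_set (k N m : Nat) (_hm : m + 2 < N) :
    (dpArr k N m).set (m + 2) (tseq k (m + 2)) = dpArr k N (m + 1) := by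
  apply List.ext_getElem
  · simp [dpArr]
  · intro j hj hj'
    simp only [dpArr, List.length_map, List.length_range] at hj'
    rw [List.getElem_set]
    simp only [dpArr, List.getElem_map, List.getElem_range]
    by_cases h : m + 2 = j
    · subst h; simp
    · rw [if_neg h]
      by_cases h2 : j ≤ m + 1
      · rw [if_pos h2, if_pos (by omega)]
      · rw [if_neg h2, if_neg (by omega)]

lemma A_loop (K N : Nat) : ∀ m : Nat, m + 2 ≤ N →
    (PySem.List.pyRange 2 (2 + (m : Int)) 1).foldl (fun dp i =>
      if i - 1 < ((K : Nat) : Int) then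
        PySem.List.pySetD dp i (PySem.List.pyGetD dp (i - 1) 0 * 2)
      else
        PySem.List.pySetD dp i
          (PySem.List.pyGetD dp (i - 1) 0 * 2 - PySem.List.pyGetD dp (i - ((K : Nat) : Int) - 1) 0)) (dpArr K N 0)
      = dpArr K N m := by
  intro m
  induction m with
  | zero =>
    intro _
    rw [PySem.List.pyRange_one_eq_nil (by omega)]
    rfl
  | succ m ih =>
    intro hN
    rw [show (2 + ((m+1 : Nat) : Int)) = (2 + (m : Int)) + 1 from by omega,
        PySem.List.pyRange_one_succ_right (by omega), List.foldl_append, ih (by omega)]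
    simp only [List.foldl_cons, List.foldl_nil]
    have hget1 : PySem.List.pyGetD (dpArr K N m) (2 + (m : Int) - 1) 0 = tseq K (m + 1) := by
      rw [show (2 + (m : Int) - 1) = ((m + 1 : Nat) : Int) from by omega,
          PySem.List.pyGetD_natCast, dpArr_getD K N m (m+1) (by omega), if_pos (by omega)]
    have hset : ∀ v : Int, PySem.List.pySetD (dpArr K N m) (2 + (m : Int)) v
        = (dpArr K N m).set (m + 2) v := by
      intro v
      rw [show (2 + (m : Int)) = ((m + 2 : Nat) : Int) from by omega,
          PySem.List.pySetD_natCast]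
    by_cases hb : m + 1 < K
    · rw [if_pos (by omega), hget1, hset]
      rw [show tseq K (m+1) * 2 = tseq K (m + 2) from by rw [tseq, if_pos (by omega)]; ring]
      exact dpArr_set K N m (by omega)
    · rw [if_neg (by omega), hget1, hset]
      have hget2 : PySem.List.pyGetD (dpArr K N m) (2 + (m : Int) - ((K:Nat):Int) - 1) 0
          = tseq K (m + 1 - K) := by
        rw [show (2 + (m : Int) - ((K:Nat):Int) - 1) = ((m + 1 - K : Nat) : Int) from by omega,
            PySem.List.pyGetD_natCast, dpArr_getD K N m (m+1-K) (by omega), if_pos (by omega)]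
      rw [hget2,
          show tseq K (m+1) * 2 - tseq K (m+1-K) = tseq K (m + 2) from by rw [tseq, if_neg (by omega)]; ring]
      exact dpArr_set K N m (by omega)

lemma A_eq_tseq (tosses k : Int) (ht : 0 ≤ tosses) (hk : 0 ≤ k) :
    coin_possibilities_bua tosses k = tseq k.toNat (tosses.toNat + 1) := by
  obtain ⟨T, rfl⟩ : ∃ T : Nat, tosses = (T : Int) := ⟨tosses.toNat, by omega⟩
  obtain ⟨K, rfl⟩ : ∃ K : Nat, k = (K : Int) := ⟨k.toNat, by omega⟩
  unfold coin_possibilities_bua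
  dsimp only
  have hinit : PySem.List.pySetD (PySem.List.pySetD (List.replicate ((T:Int) + 2).toNat (0:Int)) 0 1) 1 1
      = dpArr K (T + 2) 0 := by
    rw [PySem.List.pySetD_of_nonneg (i := 1) (h := by omega),
        PySem.List.pySetD_of_nonneg (i := 0) (h := by omega)]
    apply List.ext_getElem
    · simp [dpArr]; omega
    · intro j hj hj'
      simp only [dpArr, List.getElem_map, List.getElem_range]
      rw [List.getElem_set, List.getElem_set]
      simp only [Int.toNat_one, Int.toNat_zero]
      by_cases h1 : j = 1
      · subst h1; rw [if_pos rfl, if_pos (by omega), show tseq K 1 = 1 from by rw [tseq]]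
      · rw [if_neg (fun h => h1 h.symm)]
        by_cases h0 : j = 0
        · subst h0; rw [if_pos rfl, if_pos (by omega), show tseq K 0 = 1 from by rw [tseq]]
        · rw [if_neg (fun h => h0 h.symm), List.getElem_replicate, if_neg (by omega)]
  rw [hinit,
      show ((T:Int) + 2) = 2 + (T : Int) from by ring,
      A_loop K (T + 2) T (by omega),
      show ((T:Int) + 1) = ((T + 1 : Nat) : Int) from by omega,
      PySem.List.pyGetD_natCast, dpArr_getD K (T+2) T (T+1) (by omega), if_pos (by omega)]
  simp

-- ---- B-side: generic matrix lemmas ----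
lemma getD_map_range {α : Type} (n t : Nat) (f : Nat → α) (d : α) (h : t < n) :
    ((List.range n).map f).getD t d = f t := by
  simp [List.getD_eq_getElem?_getD, List.getElem?_map, List.getElem?_range h]

lemma dotRange_eq (n : Nat) (f : Nat → Int) : dotRange n f = ∑ t ∈ Finset.range n, f t := by
  induction n with
  | zero => simp [dotRange]
  | succ n ih =>
    rw [Finset.sum_range_succ, ← ih]
    simp [dotRange, List.range_succ]

lemma matVec_length (M : List (List Int)) (v : List Int) : (matVec M v).length = M.length := by
  simp [matVec]

lemma matMul_length (A B : List (List Int)) : (matMul A B).length = A.length := by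
  simp [matMul]

lemma idMat_length (n : Nat) : (idMat n).length = n := by simp [idMat]

lemma matPow_zero (M : List (List Int)) : matPow M 0 = idMat M.length := by
  rw [matPow]
  simp

lemma matPow_ne_zero (M : List (List Int)) (e : Nat) (h : e ≠ 0) :
    matPow M e = if e % 2 = 1 then matMul M (matMul (matPow M (e / 2)) (matPow M (e / 2)))
                 else matMul (matPow M (e / 2)) (matPow M (e / 2)) := by
  rw [matPow, if_neg h]

lemma matPow_length (M : List (List Int)) (e : Nat) : (matPow M e).length = M.length := by
  induction e using Nat.strong_induction_on with
  | _ e ih =>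
    by_cases h : e = 0
    · subst h; rw [matPow_zero, idMat_length]
    · rw [matPow_ne_zero M e h]
      by_cases ho : e % 2 = 1
      · rw [if_pos ho, matMul_length]
      · rw [if_neg ho, matMul_length]
        exact ih _ (by omega)

lemma matVec_id (n : Nat) (v : List Int) (h : v.length = n) : matVec (idMat n) v = v := by
  apply List.ext_getElem
  · rw [matVec_length, idMat_length, h]
  · intro j hj hj'
    have hjn : j < n := by rwa [matVec_length, idMat_length] at hj
    simp only [matVec, idMat, List.getElem_map, List.getElem_range]
    rw [dotRange_eq, h]
    have : ∀ t ∈ Finset.range n,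
        ((List.range n).map (fun j' => if j = j' then (1:Int) else 0)).getD t 0 * v.getD t 0
          = if j = t then v.getD t 0 else 0 := by
      intro t htn
      rw [Finset.mem_range] at htn
      rw [getD_map_range n t _ 0 htn]
      split_ifs <;> ring
    rw [Finset.sum_congr rfl this, Finset.sum_ite_eq, if_pos (Finset.mem_range.2 hjn)]
    rw [List.getD_eq_getElem v 0 hj']

lemma matVec_matMul (A B : List (List Int)) (v : List Int) (h : B.length = v.length) :
    matVec (matMul A B) v = matVec A (matVec B v) := by
  unfold matVec matMul
  rw [List.map_map]
  apply List.map_congr_left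
  intro row _
  simp only [Function.comp, List.length_map]
  have hv : ∀ t ∈ Finset.range v.length,
      ((List.range B.length).map (fun j =>
          dotRange B.length (fun s => row.getD s 0 * (B.getD s []).getD j 0))).getD t 0 * v.getD t 0
        = (dotRange B.length (fun s => row.getD s 0 * (B.getD s []).getD t 0)) * v.getD t 0 := by
    intro t htn
    rw [Finset.mem_range] at htn
    rw [getD_map_range _ t _ 0 (by omega)]
  have hw : ∀ s ∈ Finset.range B.length,
      row.getD s 0 * (B.map (fun r => dotRange v.length (fun t => r.getD t 0 * v.getD t 0))).getD s 0
        = row.getD s 0 * dotRange v.length (fun t => (B.getD s []).getD t 0 * v.getD t 0) := by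
    intro s hsn
    rw [Finset.mem_range] at hsn
    have : (B.map (fun r => dotRange v.length (fun t => r.getD t 0 * v.getD t 0))).getD s 0
        = dotRange v.length (fun t => (B.getD s []).getD t 0 * v.getD t 0) := by
      rw [List.getD_eq_getElem _ 0 (by simpa using hsn), List.getElem_map,
          List.getD_eq_getElem _ [] hsn]
    rw [this]
  rw [dotRange_eq, dotRange_eq, Finset.sum_congr rfl hv, Finset.sum_congr rfl hw]
  have hL : ∀ t ∈ Finset.range v.length,
      (dotRange B.length (fun s => row.getD s 0 * (B.getD s []).getD t 0)) * v.getD t 0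
        = ∑ s ∈ Finset.range B.length, row.getD s 0 * ((B.getD s []).getD t 0 * v.getD t 0) := by
    intro t _
    rw [dotRange_eq, Finset.sum_mul]
    exact Finset.sum_congr rfl (fun s _ => by ring)
  have hR : ∀ s ∈ Finset.range B.length,
      row.getD s 0 * dotRange v.length (fun t => (B.getD s []).getD t 0 * v.getD t 0)
        = ∑ t ∈ Finset.range v.length, row.getD s 0 * ((B.getD s []).getD t 0 * v.getD t 0) := by
    intro s _
    rw [dotRange_eq, Finset.mul_sum]
  rw [Finset.sum_congr rfl hL, Finset.sum_congr rfl hR, Finset.sum_comm]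

lemma matPow_action (M : List (List Int)) (s : Nat → List Int)
    (hlen : ∀ m, (s m).length = M.length)
    (hstep : ∀ m, matVec M (s m) = s (m + 1)) :
    ∀ e m, matVec (matPow M e) (s m) = s (m + e) := by
  intro e
  induction e using Nat.strong_induction_on with
  | _ e ih =>
    intro m
    by_cases h : e = 0
    · subst h
      rw [matPow_zero, matVec_id M.length (s m) (hlen m)]
      rfl
    · rw [matPow_ne_zero M e h]
      have hh : e / 2 < e := by omega
      have hv : matVec (matMul (matPow M (e / 2)) (matPow M (e / 2))) (s m)
          = s (m + e / 2 + e / 2) := by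
        rw [matVec_matMul _ _ _ (by rw [matPow_length, hlen]),
            ih _ hh m, ih _ hh (m + e / 2)]
      by_cases ho : e % 2 = 1
      · rw [if_pos ho,
            matVec_matMul _ _ _ (by rw [matMul_length, matPow_length, hlen]),
            hv, hstep (m + e / 2 + e / 2)]
        congr 1
        omega
      · rw [if_neg ho, hv]
        congr 1
        omega

-- ---- B-side: the concrete companion matrix and window ----
def bTop (K : Nat) : List Int :=
  ((List.replicate (K + 1) (0 : Int)).set 0 ((List.replicate (K + 1) (0 : Int)).getD 0 0 + 2)).set K
    (((List.replicate (K + 1) (0 : Int)).set 0 ((List.replicate (K + 1) (0 : Int)).getD 0 0 + 2)).getD K 0 - 1)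

def bM (K : Nat) : List (List Int) :=
  bTop K :: (List.range K).map (fun i =>
    (List.range (K + 1)).map (fun j => if j = i then (1 : Int) else 0))

def win (K m : Nat) : List Int := (List.range (K + 1)).map (fun i => tseq K (m + (K - i)))

lemma win_length (K m : Nat) : (win K m).length = K + 1 := by simp [win]

lemma win_getD (K m t : Nat) (h : t < K + 1) : (win K m).getD t 0 = tseq K (m + (K - t)) :=
  getD_map_range _ t _ 0 h

lemma bM_length (K : Nat) : (bM K).length = K + 1 := by simp [bM]

lemma bTop_getD (K t : Nat) (ht : t < K + 1) :
    (bTop K).getD t 0 = (if t = 0 then 2 else 0) + (if t = K then -1 else 0) := by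
  unfold bTop
  rw [List.getD_eq_getElem _ 0 (by simp only [List.length_set, List.length_replicate]; omega),
      List.getElem_set]
  by_cases htK : K = t
  · rw [if_pos htK]
    rw [List.getD_eq_getElem _ 0 (by simp only [List.length_set, List.length_replicate]; omega),
        List.getElem_set]
    by_cases hK0 : K = 0
    · subst hK0
      have ht0 : t = 0 := by omega
      subst ht0
      decide
    · rw [if_neg (by omega), List.getElem_replicate,
          if_neg (by omega), if_pos htK.symm]
      norm_num
  · rw [if_neg htK, List.getElem_set]
    by_cases ht0 : t = 0
    · rw [if_pos (by omega), if_pos ht0, if_neg (by omega)]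
      simp
    · rw [if_neg (by omega), List.getElem_replicate, if_neg ht0, if_neg (by omega)]
      norm_num

lemma matVec_getD (M : List (List Int)) (v : List Int) (j : Nat) (h : j < M.length) :
    (matVec M v).getD j 0
      = dotRange v.length (fun t => (M.getD j []).getD t 0 * v.getD t 0) := by
  rw [List.getD_eq_getElem _ 0 (by rwa [matVec_length])]
  simp only [matVec, List.getElem_map]
  rw [List.getD_eq_getElem _ [] h]

lemma bStep (K m : Nat) : matVec (bM K) (win K m) = win K (m + 1) := by
  apply List.ext_getElem
  · rw [matVec_length, bM_length, win_length]
  · intro j hj hj'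
    have hjK : j < K + 1 := by rwa [matVec_length, bM_length] at hj
    rw [← List.getD_eq_getElem _ 0 hj, ← List.getD_eq_getElem _ 0 hj']
    rw [matVec_getD _ _ j (by rwa [bM_length]), win_length, win_getD K (m + 1) j hjK,
        dotRange_eq]
    cases j with
    | zero =>
      -- first row: the recurrence row 2*dp[i-1] - dp[i-k-1]
      have hrow : (bM K).getD 0 [] = bTop K := rfl
      rw [hrow]
      have hterm : ∀ t ∈ Finset.range (K + 1),
          (bTop K).getD t 0 * (win K m).getD t 0
            = (if t = 0 then 2 * tseq K (m + (K - t)) else 0)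
              + (if t = K then -tseq K (m + (K - t)) else 0) := by
        intro t htn
        rw [Finset.mem_range] at htn
        rw [bTop_getD K t htn, win_getD K m t htn]
        split_ifs <;> ring
      rw [Finset.sum_congr rfl hterm, Finset.sum_add_distrib,
          Finset.sum_ite_eq', Finset.sum_ite_eq',
          if_pos (Finset.mem_range.2 (by omega : 0 < K + 1)),
          if_pos (Finset.mem_range.2 (by omega : K < K + 1))]
      rw [show m + (K - 0) = m + K from by omega, show m + (K - K) = m from by omega,
          show m + 1 + (K - 0) = m + K + 1 from by omega, tseq_step]
      ring
    | succ i =>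
      -- shift rows: entry i+1 of the new window is entry i of the old one
      have hiK : i < K := by omega
      have hrow : (bM K).getD (i + 1) []
          = (List.range (K + 1)).map (fun j => if j = i then (1 : Int) else 0) := by
        rw [show bM K = bTop K :: (List.range K).map (fun i =>
              (List.range (K + 1)).map (fun j => if j = i then (1 : Int) else 0)) from rfl,
            List.getD_cons_succ, getD_map_range _ i _ [] hiK]
      rw [hrow]
      have hterm : ∀ t ∈ Finset.range (K + 1),
          ((List.range (K + 1)).map (fun j => if j = i then (1 : Int) else 0)).getD t 0
              * (win K m).getD t 0
            = if t = i then tseq K (m + (K - t)) else 0 := by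
        intro t htn
        rw [Finset.mem_range] at htn
        rw [getD_map_range _ t _ 0 htn, win_getD K m t htn]
        split_ifs <;> ring
      rw [Finset.sum_congr rfl hterm, Finset.sum_ite_eq',
          if_pos (Finset.mem_range.2 (by omega : i < K + 1))]
      congr 1
      omega

lemma bV0_eq (K : Nat) :
    ((List.range K).map (fun i => (2 : Int) ^ (K - 1 - i))) ++ [(1 : Int)] = win K 0 := by
  apply List.ext_getElem
  · simp [win]
  · intro j hj hj'
    rw [win_length] at hj'
    simp only [win, List.getElem_map, List.getElem_range]
    by_cases hjK : j < K
    · rw [List.getElem_append_left (by simpa using hjK), List.getElem_map, List.getElem_range]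
      rw [show (0 : Nat) + (K - j) = K - j from by omega,
          tseq_doubling K (K - j) (by omega) (by omega)]
      congr 1
      omega
    · have hjE : j = K := by omega
      subst hjE
      rw [List.getElem_append_right (by simp)]
      simp [tseq]

lemma B_eq_tseq (tosses k : Int) (ht : 0 ≤ tosses) (hk : 0 ≤ k) :
    coin_possibilities_bua_alt tosses k = tseq k.toNat (tosses.toNat + 1) := by
  obtain ⟨T, rfl⟩ : ∃ T : Nat, tosses = (T : Int) := ⟨tosses.toNat, by omega⟩
  obtain ⟨K, rfl⟩ : ∃ K : Nat, k = (K : Int) := ⟨k.toNat, by omega⟩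
  simp only [coin_possibilities_bua_alt, Int.toNat_natCast]
  by_cases h1 : (T : Int) + 1 ≤ (K : Int)
  · rw [if_pos h1, show ((T:Int) + 1 - 1) = (T:Int) from by ring, Int.toNat_natCast,
        tseq_doubling K (T + 1) (by omega) (by omega)]
    simp
  · rw [if_neg h1]
    have hKT : K ≤ T := by omega
    rw [show ((K : Int) + 1).toNat = K + 1 from by omega,
        show ((T : Int) + 1 - (K : Int)).toNat = T + 1 - K from by omega]
    show (matVec (matPow (bM K) (T + 1 - K))
        (((List.range K).map (fun i => (2 : Int) ^ (K - 1 - i))) ++ [(1 : Int)])).getD 0 0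
      = tseq K (T + 1)
    rw [bV0_eq K,
        matPow_action (bM K) (win K) (fun m => by rw [win_length, bM_length]) (bStep K)
          (T + 1 - K) 0,
        win_getD K _ 0 (by omega)]
    congr 1
    omega

-- ===== VERDICT (by name: the statement is the Claim_ definition above) =====
theorem coin_possibilities_bua_spec : Claim_equal_coin_possibilities_bua := by
  intro tosses k _ hpre
  unfold Spec_coin_possibilities_bua
  rw [A_eq_tseq tosses k hpre.1 hpre.2, B_eq_tseq tosses k hpre.1 hpre.2]
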